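-- pv_equiv track=rewrite | github.com/Oaawal/phishtriage-ng-lite | app.py | email_verdict
-- ===== SOURCE A (Python) =====
-- def email_verdict(email_checks):
--     if not email_checks:
--         return "WARN"
--     fails = sum(1 for c in email_checks if c["status"] == "FAIL")
--     passes = sum(1 for c in email_checks if c["status"] == "PASS")
--     if fails >= 1:
--         return "FAIL"
--     if passes >= 2:
--         return "PASS"
--     return "WARN"
-- ===== SOURCE B (Python) =====
-- def _summary(checks, lo, hi):
--     # combine (has_fail, pass_count) summaries over checks[lo:hi] by halving
--     if hi - lo == 1:
--         s = checks[lo]["status"]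
--         return (s == "FAIL", 1 if s == "PASS" else 0)
--     mid = (lo + hi) // 2
--     f1, p1 = _summary(checks, lo, mid)
--     f2, p2 = _summary(checks, mid, hi)
--     return (f1 or f2, p1 + p2)
--
-- def email_verdict(email_checks):
--     if not email_checks:
--         return "WARN"
--     has_fail, passes = _summary(email_checks, 0, len(email_checks))
--     if has_fail:
--         return "FAIL"
--     return "PASS" if passes >= 2 else "WARN"
-- ===== Notes on version B (the rewrite author's own statement) =====
-- stated objective: alternative
-- what changed: A's two full counting comprehensions plus a threshold ladder are replaced by a recursive divide-and-conquer that combines (has_fail, pass_count) monoid summaries of the two halves of the index range, then thresholds the root summary.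
import Mathlib
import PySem

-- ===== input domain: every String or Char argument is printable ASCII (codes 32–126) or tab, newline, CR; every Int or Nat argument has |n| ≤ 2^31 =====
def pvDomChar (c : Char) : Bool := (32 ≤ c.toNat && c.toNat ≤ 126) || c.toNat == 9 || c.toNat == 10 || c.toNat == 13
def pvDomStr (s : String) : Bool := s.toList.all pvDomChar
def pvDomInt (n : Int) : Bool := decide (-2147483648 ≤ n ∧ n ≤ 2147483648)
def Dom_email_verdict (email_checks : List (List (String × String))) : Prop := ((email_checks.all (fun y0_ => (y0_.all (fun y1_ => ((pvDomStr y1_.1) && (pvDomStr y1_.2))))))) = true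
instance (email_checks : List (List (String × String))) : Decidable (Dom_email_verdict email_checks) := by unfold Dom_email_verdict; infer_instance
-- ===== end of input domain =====

-- B replaces A's two counting scans with a recursive divide-and-conquer that merges (has_fail, pass_count) summaries of index-range halves; return values agree wherever every check has a "status" key.


-- ===== PORT A =====
-- c["status"] raises KeyError when the key is missing; Pre_ excludes those inputs, so
-- the Option comparison below is exact on Pre_.
def email_verdict (email_checks : List (List (String × String))) : String :=
  if email_checks = [] then "WARN"
  else
    let fails := email_checks.countP (fun c => (PySem.Dict.mk c).get? "status" == some "FAIL")
    let passes := email_checks.countP (fun c => (PySem.Dict.mk c).get? "status" == some "PASS")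
    if fails ≥ 1 then "FAIL"
    else if passes ≥ 2 then "PASS"
    else "WARN"

-- ===== PORT B =====
-- _summary of Source B: divide-and-conquer over the index range [lo, hi).
-- checks[lo] is ported via pyGet?; the index is always in range when called as in Source B
-- (the `hi ≤ lo + 1` branch is a totality guard only, never reached from email_verdict_alt).
def evSummary (checks : List (List (String × String))) (lo hi : Nat) : Bool × Nat :=
  if hi - lo = 1 then
    let st := (PySem.Dict.mk ((PySem.List.pyGet? checks (lo : Int)).getD [])).get? "status"
    (st == some "FAIL", if st == some "PASS" then 1 else 0)
  else if hi ≤ lo + 1 then (false, 0)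
  else
    let mid := (lo + hi) / 2
    let s1 := evSummary checks lo mid
    let s2 := evSummary checks mid hi
    (s1.1 || s2.1, s1.2 + s2.2)
termination_by hi - lo
decreasing_by all_goals omega

def email_verdict_alt (email_checks : List (List (String × String))) : String :=
  if email_checks = [] then "WARN"
  else
    let s := evSummary email_checks 0 email_checks.length
    if s.1 then "FAIL"
    else if s.2 ≥ 2 then "PASS"
    else "WARN"

-- ===== PRECONDITION & SPEC =====
-- Pre_ excludes inputs where some check lacks a "status" key: there Python A raises KeyError.
def Pre_email_verdict (email_checks : List (List (String × String))) : Prop :=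
  ∀ c ∈ email_checks, ((PySem.Dict.mk c).get? "status").isSome
instance (email_checks : List (List (String × String))) : Decidable (Pre_email_verdict email_checks) := by unfold Pre_email_verdict; infer_instance

def pvWitness_email_verdict : (List (List (String × String))) :=
  [[("status", "PASS")], [("status", "WARN")]]

def Spec_email_verdict (email_checks : List (List (String × String))) (out : String) : Prop := out = email_verdict_alt email_checks
instance (email_checks : List (List (String × String))) (out : String) : Decidable (Spec_email_verdict email_checks out) := by unfold Spec_email_verdict; infer_instance

-- ===== CLAIM (what is proved, stated in full; the proofs are below) =====
def Claim_equal_email_verdict : Prop := ∀ (email_checks : List (List (String × String))), Dom_email_verdict email_checks → Pre_email_verdict email_checks → Spec_email_verdict email_checks (email_verdict email_checks)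

-- ===== LEMMAS AND PROOFS =====
def evFailP (c : List (String × String)) : Bool := (PySem.Dict.mk c).get? "status" == some "FAIL"
def evPassP (c : List (String × String)) : Bool := (PySem.Dict.mk c).get? "status" == some "PASS"

theorem evSummary_spec (checks : List (List (String × String))) :
    ∀ n lo hi, hi - lo = n → lo < hi → hi ≤ checks.length →
      evSummary checks lo hi =
        (((checks.drop lo).take (hi - lo)).any evFailP,
         ((checks.drop lo).take (hi - lo)).countP evPassP) := by
  intro n
  induction n using Nat.strong_induction_on with
  | _ n ih =>
    intro lo hi hn hlt hlen
    rw [evSummary]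
    by_cases h1 : hi - lo = 1
    · have hlo : lo < checks.length := by omega
      have hget : PySem.List.pyGet? checks (lo : Int) = some checks[lo] :=
        PySem.List.pyGet?_ofNat checks lo hlo
      have hsl : (checks.drop lo).take 1 = [checks[lo]] := by
        rw [List.take_one, List.head?_drop]
        simp [List.getElem?_eq_getElem hlo]
      simp [h1, hget, hsl, evFailP, evPassP]
    · have h2 : ¬ hi ≤ lo + 1 := by omega
      simp only [h1, h2, if_false]
      have hm1 : lo < (lo + hi) / 2 := by omega
      have hm2 : (lo + hi) / 2 < hi := by omega
      rw [ih ((lo + hi) / 2 - lo) (by omega) lo _ rfl hm1 (by omega),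
          ih (hi - (lo + hi) / 2) (by omega) _ hi rfl hm2 hlen]
      have hsplit : (checks.drop lo).take (hi - lo) =
          (checks.drop lo).take ((lo + hi) / 2 - lo) ++
          (checks.drop ((lo + hi) / 2)).take (hi - (lo + hi) / 2) := by
        have h3 : hi - lo = ((lo + hi) / 2 - lo) + (hi - (lo + hi) / 2) := by omega
        have h4 : lo + ((lo + hi) / 2 - lo) = (lo + hi) / 2 := by omega
        rw [h3, List.take_add, List.drop_drop, h4]
      rw [hsplit]
      simp [List.any_append, List.countP_append]

-- ===== VERDICT (by name: the statement is the Claim_ definition above) =====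
theorem email_verdict_spec : Claim_equal_email_verdict := by
  intro l _ _
  show email_verdict l = email_verdict_alt l
  unfold email_verdict email_verdict_alt
  by_cases h : l = []
  · simp [h]
  · have hlen : 0 < l.length := List.length_pos_iff.mpr h
    rw [evSummary_spec l l.length 0 l.length rfl hlen le_rfl]
    simp only [h, if_false, List.drop_zero, Nat.sub_zero, List.take_length]
    have hfail : (1 ≤ l.countP (fun c => (PySem.Dict.mk c).get? "status" == some "FAIL")) ↔
        (l.any evFailP = true) := by
      rw [List.any_eq_true]
      exact List.countP_pos_iff
    by_cases hc : 1 ≤ l.countP (fun c => (PySem.Dict.mk c).get? "status" == some "FAIL")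
    · rw [if_pos hc, if_pos (hfail.mp hc)]
    · have hf : ¬ (l.any evFailP = true) := fun a => hc (hfail.mpr a)
      rw [if_neg hc, if_neg hf]
      rfl
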